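-- pv_equiv track=rewrite | github.com/TetsuroAndo/42-minishell_v2 | scripts/clean_comments.py | first_n_lines_offset
-- ===== SOURCE A (Python) =====
-- def first_n_lines_offset(txt: str, n: int) -> int:
--     pos = 0
--     for _ in range(n):
--         nl = txt.find("\n", pos)
--         if nl == -1:
--             return len(txt)
--         pos = nl + 1
--     return pos
-- ===== SOURCE B (Python) =====
-- def first_n_lines_offset(txt: str, n: int) -> int:
--     if n <= 0:
--         return 0
--     seen = 0
--     for i, ch in enumerate(txt):
--         if ch == "\n":
--             seen += 1
--             if seen == n:
--                 return i + 1
--     return len(txt)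
-- ===== Notes on version B (the rewrite author's own statement) =====
-- stated objective: alternative
-- what changed: Replaces the per-line loop of repeated str.find calls with a single character pass that counts newlines (with an explicit n <= 0 guard returning 0), returning index+1 at the n-th newline or len(txt) if fewer lines exist.
import Mathlib
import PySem

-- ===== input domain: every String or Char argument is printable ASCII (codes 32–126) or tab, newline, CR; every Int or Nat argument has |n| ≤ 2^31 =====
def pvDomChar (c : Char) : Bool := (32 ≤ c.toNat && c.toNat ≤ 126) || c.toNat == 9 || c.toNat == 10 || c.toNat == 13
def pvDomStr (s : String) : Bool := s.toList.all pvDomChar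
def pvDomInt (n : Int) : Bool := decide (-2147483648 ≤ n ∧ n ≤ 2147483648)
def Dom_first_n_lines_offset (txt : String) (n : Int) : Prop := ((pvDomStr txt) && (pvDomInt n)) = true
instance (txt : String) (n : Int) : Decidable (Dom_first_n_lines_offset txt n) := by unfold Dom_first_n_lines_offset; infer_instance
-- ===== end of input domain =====

-- B replaces A's per-line repeated str.find loop by a single character pass counting
-- newlines (objective: alternative decomposition, same cost).

-- ===== PORT A =====
-- the 'for _ in range(n)' loop: each iteration finds the next '\n' from pos
def pvALoop (txt : List Char) (pos : Int) : Nat → Int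
  | 0 => pos
  | fuel + 1 =>
    let nl := PySem.Chars.findFrom txt ['\n'] pos none
    if nl = -1 then (txt.length : Int)
    else pvALoop txt (nl + 1) fuel

def first_n_lines_offset (txt : String) (n : Int) : Int :=
  pvALoop txt.toList 0 n.toNat

-- ===== PORT B =====
-- the 'for i, ch in enumerate(txt)' loop of Source B: count newlines, return i+1 at the n-th
def pvBScan (cs : List Char) (i : Nat) (seen : Int) (n : Int) (total : Int) : Int :=
  match cs with
  | [] => total
  | c :: rest =>
    if c = '\n' then
      if seen + 1 = n then ((i : Int) + 1)
      else pvBScan rest (i + 1) (seen + 1) n total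
    else pvBScan rest (i + 1) seen n total

def first_n_lines_offset_alt (txt : String) (n : Int) : Int :=
  if n ≤ 0 then 0
  else pvBScan txt.toList 0 0 n (txt.toList.length : Int)

-- ===== PRECONDITION & SPEC =====
def Spec_first_n_lines_offset (txt : String) (n : Int) (out : Int) : Prop := out = first_n_lines_offset_alt txt n
instance (txt : String) (n : Int) (out : Int) : Decidable (Spec_first_n_lines_offset txt n out) := by unfold Spec_first_n_lines_offset; infer_instance

-- ===== CLAIM (what is proved, stated in full; the proofs are below) =====
def Claim_equal_first_n_lines_offset : Prop := ∀ (txt : String) (n : Int), Dom_first_n_lines_offset txt n → Spec_first_n_lines_offset txt n (first_n_lines_offset txt n)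

-- ===== LEMMAS AND PROOFS =====

-- reference scan: B's scan with a count-down of remaining newlines instead of a count-up
def pvRScan (cs : List Char) (i : Nat) (r : Int) (total : Int) : Int :=
  match cs with
  | [] => total
  | c :: rest =>
    if c = '\n' then
      if r = 1 then ((i : Int) + 1)
      else pvRScan rest (i + 1) (r - 1) total
    else pvRScan rest (i + 1) r total

theorem pvBScan_eq_rScan (cs : List Char) (i : Nat) (seen n total : Int) :
    pvBScan cs i seen n total = pvRScan cs i (n - seen) total := by
  induction cs generalizing i seen with
  | nil => rfl
  | cons c rest ih =>
    simp only [pvBScan, pvRScan]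
    by_cases hc : c = '\n'
    · rw [if_pos hc, if_pos hc]
      by_cases h1 : seen + 1 = n
      · rw [if_pos h1, if_pos (by omega)]
      · rw [if_neg h1, if_neg (by omega), ih]
        congr 1
        omega
    · rw [if_neg hc, if_neg hc, ih]

theorem singleton_prefix_iff (c : Char) (l : List Char) :
    [c] <+: l ↔ ∃ t, l = c :: t := by
  cases l with
  | nil => simp
  | cons a t =>
    constructor
    · rintro ⟨s, hs⟩
      simp only [List.singleton_append] at hs
      cases hs
      exact ⟨t, rfl⟩
    · rintro ⟨t', ht⟩
      cases ht
      exact ⟨t, by simp⟩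

theorem find_nl_cons (c : Char) (cs : List Char) :
    PySem.Chars.find (c :: cs) ['\n'] =
      if c = '\n' then 0
      else if PySem.Chars.find cs ['\n'] = -1 then -1
      else 1 + PySem.Chars.find cs ['\n'] := by
  by_cases hc : c = '\n'
  · rw [if_pos hc]
    subst hc
    have hinf : ['\n'] <:+: ('\n' :: cs) := ⟨[], cs, by simp⟩
    have hnn : 0 ≤ PySem.Chars.find ('\n' :: cs) ['\n'] :=
      (PySem.Chars.find_nonneg_iff _ _).mpr hinf
    obtain ⟨hpre, hmin⟩ := PySem.Chars.find_spec hnn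
    by_contra hne
    have hpos : 0 < (PySem.Chars.find ('\n' :: cs) ['\n']).toNat := by omega
    exact hmin 0 hpos ((singleton_prefix_iff _ _).mpr ⟨cs, by simp⟩)
  · rw [if_neg hc]
    by_cases hin : ['\n'] <:+: cs
    · have hj : 0 ≤ PySem.Chars.find cs ['\n'] :=
        (PySem.Chars.find_nonneg_iff _ _).mpr hin
      rw [if_neg (by omega)]
      obtain ⟨hpreJ, hminJ⟩ := PySem.Chars.find_spec hj
      have hinf' : ['\n'] <:+: (c :: cs) := by
        obtain ⟨p, s, hps⟩ := hin
        exact ⟨c :: p, s, by simp [hps]⟩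
      have hm : 0 ≤ PySem.Chars.find (c :: cs) ['\n'] :=
        (PySem.Chars.find_nonneg_iff _ _).mpr hinf'
      obtain ⟨hpreM, hminM⟩ := PySem.Chars.find_spec hm
      obtain ⟨m, hm'⟩ : ∃ m : Nat, PySem.Chars.find (c :: cs) ['\n'] = (m : Int) :=
        ⟨(PySem.Chars.find (c :: cs) ['\n']).toNat, by omega⟩
      obtain ⟨j, hj'⟩ : ∃ j : Nat, PySem.Chars.find cs ['\n'] = (j : Int) :=
        ⟨(PySem.Chars.find cs ['\n']).toNat, by omega⟩
      rw [hm'] at hpreM hminM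
      rw [hj'] at hpreJ hminJ
      simp only [Int.toNat_natCast] at hpreM hminM hpreJ hminJ
      have hm0 : m ≠ 0 := by
        intro h0
        subst h0
        simp only [List.drop_zero] at hpreM
        have h1 : '\n' = c := by simpa using hpreM
        exact hc h1.symm
      have hdropM : (c :: cs).drop m = cs.drop (m - 1) := by
        cases m with
        | zero => exact absurd rfl hm0
        | succ k => simp
      have hjle : j ≤ m - 1 := by
        by_contra hlt
        rw [not_le] at hlt
        exact hminJ (m - 1) (by omega) (hdropM ▸ hpreM)
      have hmle : m ≤ j + 1 := by
        by_contra hlt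
        rw [not_le] at hlt
        exact hminM (j + 1) (by omega) (by simpa using hpreJ)
      rw [hm', hj']
      omega
    · have h1 : PySem.Chars.find cs ['\n'] = -1 :=
        (PySem.Chars.find_eq_neg_one_iff _ _).mpr hin
      rw [if_pos h1]
      apply (PySem.Chars.find_eq_neg_one_iff _ _).mpr
      intro hinf
      apply hin
      obtain ⟨p, s, hps⟩ := hinf
      cases p with
      | nil =>
        simp only [List.nil_append, List.cons_append, List.nil_append] at hps
        injection hps with h1 _
        exact absurd h1.symm hc
      | cons a p' =>
        simp only [List.cons_append] at hps
        injection hps with _ h2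
        exact ⟨p', s, h2⟩

theorem pvALoop_eq_rScan (full : List Char) (cs : List Char) (k : Nat) (fuel : Nat)
    (hk : k ≤ full.length) (hcs : cs = full.drop k) (hf : 1 ≤ fuel) :
    pvALoop full (k : Int) fuel = pvRScan cs k (fuel : Int) (full.length : Int) := by
  induction cs generalizing k fuel with
  | nil =>
    have hkl : k = full.length := by
      have := congrArg List.length hcs
      simp at this
      omega
    obtain ⟨f, rfl⟩ : ∃ f, fuel = f + 1 := ⟨fuel - 1, by omega⟩
    simp only [pvALoop, pvRScan]
    rw [PySem.Chars.findFrom_natCast full ['\n'] k hk]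
    have : PySem.Chars.find (full.drop k) ['\n'] = -1 := by
      rw [← hcs]
      exact (PySem.Chars.find_eq_neg_one_iff _ _).mpr (by
        intro h
        have := h.sublist.length_le
        simp at this)
    rw [this]
    simp
  | cons c rest ih =>
    have hlt : k < full.length := by
      by_contra h
      rw [not_lt] at h
      have : full.drop k = [] := List.drop_eq_nil_of_le h
      rw [this] at hcs
      exact absurd hcs (by simp)
    have hrest : rest = full.drop (k + 1) := by
      rw [← List.tail_drop, ← hcs]
      rfl
    obtain ⟨f, rfl⟩ : ∃ f, fuel = f + 1 := ⟨fuel - 1, by omega⟩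
    have hfind : PySem.Chars.find (full.drop k) ['\n'] =
        (if c = '\n' then 0
         else if PySem.Chars.find rest ['\n'] = -1 then -1
         else 1 + PySem.Chars.find rest ['\n']) := by
      rw [← hcs, find_nl_cons]
    by_cases hc : c = '\n'
    · -- the first newline from k is at k itself
      have hFF : PySem.Chars.findFrom full ['\n'] (k : Int) none = (k : Int) := by
        rw [PySem.Chars.findFrom_natCast full ['\n'] k hk, hfind, if_pos hc]
        norm_num
      have hknn : ¬ ((k : Int) = -1) := by omega
      simp only [pvALoop]
      rw [hFF, if_neg hknn]
      simp only [pvRScan, if_pos hc]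
      by_cases hf1 : f = 0
      · subst hf1
        rw [if_pos (by norm_num)]
        simp [pvALoop]
      · rw [if_neg (by
          push_cast
          omega)]
        have : ((k : Int) + 1) = ((k + 1 : Nat) : Int) := by push_cast; ring
        rw [this, ih (k + 1) f (by omega) hrest (by omega)]
        congr 1
        push_cast
        ring
    · -- skip the non-newline character: findFrom from k equals findFrom from k+1
      have hstep : pvALoop full (k : Int) (f + 1) = pvALoop full ((k + 1 : Nat) : Int) (f + 1) := by
        have hfind1 : PySem.Chars.find (full.drop (k + 1)) ['\n'] = PySem.Chars.find rest ['\n'] := by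
          rw [hrest]
        by_cases hrf : PySem.Chars.find rest ['\n'] = -1
        · have hA : PySem.Chars.findFrom full ['\n'] (k : Int) none = -1 := by
            rw [PySem.Chars.findFrom_natCast full ['\n'] k hk, hfind, if_neg hc, if_pos hrf]
            simp
          have hB : PySem.Chars.findFrom full ['\n'] ((k + 1 : Nat) : Int) none = -1 := by
            rw [PySem.Chars.findFrom_natCast full ['\n'] (k + 1) (by omega), hfind1, if_pos hrf]
          simp only [pvALoop]
          rw [hA, hB]
        · have hnn : 0 ≤ PySem.Chars.find rest ['\n'] := by
            have := PySem.Chars.neg_one_le_find rest ['\n']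
            omega
          have hA : PySem.Chars.findFrom full ['\n'] (k : Int) none =
              ((k + 1 : Nat) : Int) + PySem.Chars.find rest ['\n'] := by
            rw [PySem.Chars.findFrom_natCast full ['\n'] k hk, hfind, if_neg hc, if_neg hrf,
                if_neg (by omega)]
            push_cast
            ring
          have hB : PySem.Chars.findFrom full ['\n'] ((k + 1 : Nat) : Int) none =
              ((k + 1 : Nat) : Int) + PySem.Chars.find rest ['\n'] := by
            rw [PySem.Chars.findFrom_natCast full ['\n'] (k + 1) (by omega), hfind1, if_neg hrf]
          simp only [pvALoop]
          rw [hA, hB]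
      rw [hstep, ih (k + 1) (f + 1) (by omega) hrest (by omega)]
      simp only [pvRScan, if_neg hc]

-- ===== VERDICT (by name: the statement is the Claim_ definition above) =====
theorem first_n_lines_offset_spec : Claim_equal_first_n_lines_offset := by
  intro txt n _
  unfold Spec_first_n_lines_offset first_n_lines_offset first_n_lines_offset_alt
  by_cases hn : n ≤ 0
  · rw [if_pos hn]
    have : n.toNat = 0 := by omega
    rw [this]
    rfl
  · rw [if_neg hn]
    rw [pvBScan_eq_rScan]
    have h1 : 1 ≤ n.toNat := by omega
    have := pvALoop_eq_rScan txt.toList txt.toList 0 n.toNat (by omega) (by simp) h1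
    simp only [Nat.cast_zero] at this
    rw [this]
    congr 1
    omega
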